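-- pv_equiv track=rewrite | github.com/aspineonxyz/coding-challenges | Hackerrank/Algorithms/Implementation/20. Designer PDF Viewer/designer-pdf-viewer.py | highlighted_area
-- ===== SOURCE A (Python) =====
-- import string
--
-- def highlighted_area(word, heights):
--   height = 0
--   alphabet = string.ascii_letters
--   for i in range(len(alphabet)):
--     if alphabet[i] in word:
--       if heights[i] > height:
--         height = heights[i]
--   return len(word) * height
-- ===== SOURCE B (Python) =====
-- def highlighted_area(word, heights):
--     best = 0
--     for c in word:
--         if 'a' <= c <= 'z':
--             h = heights[ord(c) - 97]
--         elif 'A' <= c <= 'Z':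
--             h = heights[26 + ord(c) - 65]
--         else:
--             continue
--         if h > best:
--             best = h
--     return len(word) * best
-- ===== Notes on version B (the rewrite author's own statement) =====
-- stated objective: simpler
-- what changed: Instead of scanning all 52 ascii_letters and doing a substring test of each against word, B makes one pass over word, computes each letter's height index arithmetically from its character code, and keeps a running maximum.
import Mathlib
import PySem

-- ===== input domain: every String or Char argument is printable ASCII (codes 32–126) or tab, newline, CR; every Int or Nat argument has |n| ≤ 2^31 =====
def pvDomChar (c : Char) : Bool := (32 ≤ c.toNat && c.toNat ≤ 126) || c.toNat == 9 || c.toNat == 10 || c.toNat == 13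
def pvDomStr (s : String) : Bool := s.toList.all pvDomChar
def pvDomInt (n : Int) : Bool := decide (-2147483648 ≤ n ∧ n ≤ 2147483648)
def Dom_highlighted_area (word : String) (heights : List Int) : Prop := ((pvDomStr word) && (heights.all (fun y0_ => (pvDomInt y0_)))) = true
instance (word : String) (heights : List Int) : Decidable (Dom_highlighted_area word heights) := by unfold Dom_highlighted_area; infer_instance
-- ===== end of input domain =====

-- B replaces A's scan over all 52 letters (substring test + indexed lookup each) by a single
-- pass over `word` computing each letter's height index arithmetically from its code (objective: simpler).

-- ===== PORT A =====
-- string.ascii_letters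
def pyAsciiLetters : List Char := "abcdefghijklmnopqrstuvwxyzABCDEFGHIJKLMNOPQRSTUVWXYZ".toList

def highlighted_area (word : String) (heights : List Int) : Int :=
  let alphabet := pyAsciiLetters
  let height : Int :=
    (PySem.List.pyRange 0 (alphabet.length : Int) 1).foldl
      (fun height i =>
        if PySem.Chars.isIn [PySem.List.pyGetD alphabet i ' '] word.toList then
          if PySem.List.pyGetD heights i 0 > height then PySem.List.pyGetD heights i 0 else height
        else height) 0
  (word.toList.length : Int) * height

-- ===== PORT B =====
def highlighted_area_alt (word : String) (heights : List Int) : Int :=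
  let best : Int :=
    word.toList.foldl
      (fun best c =>
        if 'a' ≤ c ∧ c ≤ 'z' then
          let h := PySem.List.pyGetD heights ((c.toNat : Int) - 97) 0
          if h > best then h else best
        else if 'A' ≤ c ∧ c ≤ 'Z' then
          let h := PySem.List.pyGetD heights (26 + (c.toNat : Int) - 65) 0
          if h > best then h else best
        else best) 0
  (word.toList.length : Int) * best

-- ===== PRECONDITION & SPEC =====
-- Pre_ excludes exactly the inputs where the Python A raises IndexError: a letter occurs in
-- `word` whose position in string.ascii_letters is ≥ len(heights) (both Pythons raise there).
def Pre_highlighted_area (word : String) (heights : List Int) : Prop :=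
  (word.toList.all fun c =>
    (!(97 ≤ c.toNat && c.toNat ≤ 122) || decide (c.toNat - 97 < heights.length)) &&
    (!(65 ≤ c.toNat && c.toNat ≤ 90) || decide (26 + (c.toNat - 65) < heights.length))) = true
instance (word : String) (heights : List Int) : Decidable (Pre_highlighted_area word heights) := by unfold Pre_highlighted_area; infer_instance

def pvWitness_highlighted_area : String × List Int :=
  ("ab", [3, 1])

def Spec_highlighted_area (word : String) (heights : List Int) (out : Int) : Prop := out = highlighted_area_alt word heights
instance (word : String) (heights : List Int) (out : Int) : Decidable (Spec_highlighted_area word heights out) := by unfold Spec_highlighted_area; infer_instance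

-- ===== CLAIM (what is proved, stated in full; the proofs are below) =====
def Claim_equal_highlighted_area : Prop := ∀ (word : String) (heights : List Int), Dom_highlighted_area word heights → Pre_highlighted_area word heights → Spec_highlighted_area word heights (highlighted_area word heights)

-- ===== LEMMAS AND PROOFS =====

-- the height read for index i (total form used by both ports)
def pvG (heights : List Int) (i : Nat) : Int := heights.getD i 0

-- the letter index of a character, as B computes it
def pvIdx (c : Char) : Option Nat :=
  if 'a' ≤ c ∧ c ≤ 'z' then some (c.toNat - 97)
  else if 'A' ≤ c ∧ c ≤ 'Z' then some (26 + (c.toNat - 65)) else none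

-- running maximum of pvG over an index list
def pvM (heights : List Int) (s : List Nat) : Int :=
  s.foldl (fun h i => max h (pvG heights i)) 0

theorem pvM_shift (H : List Int) (s : List Nat) (a b : Int) :
    s.foldl (fun h i => max h (pvG H i)) (max a b) = max a (s.foldl (fun h i => max h (pvG H i)) b) := by
  induction s generalizing b with
  | nil => rfl
  | cons i s ih => simp only [List.foldl_cons, max_assoc, ih]

theorem pvM_cons (H : List Int) (i : Nat) (s : List Nat) :
    pvM H (i :: s) = max (pvG H i) (pvM H s) := by
  have := pvM_shift H s (pvG H i) 0
  simpa [pvM, max_comm] using this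

theorem pvM_nonneg (H : List Int) (s : List Nat) : 0 ≤ pvM H s := by
  induction s with
  | nil => simp [pvM]
  | cons i s ih => rw [pvM_cons]; exact le_trans ih (le_max_right _ _)

theorem le_pvM (H : List Int) (s : List Nat) (i : Nat) (h : i ∈ s) : pvG H i ≤ pvM H s := by
  induction s with
  | nil => cases h
  | cons j s ih =>
    rw [pvM_cons]
    rcases List.mem_cons.mp h with h | h
    · subst h; exact le_max_left _ _
    · exact le_trans (ih h) (le_max_right _ _)

theorem pvM_le (H : List Int) (s : List Nat) (x : Int) (hx : 0 ≤ x)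
    (h : ∀ i ∈ s, pvG H i ≤ x) : pvM H s ≤ x := by
  induction s with
  | nil => simpa [pvM]
  | cons i s ih =>
    rw [pvM_cons]
    exact max_le (h i (List.mem_cons_self ..)) (ih fun j hj => h j (List.mem_cons_of_mem _ hj))

theorem pvM_congr (H : List Int) (s t : List Nat) (h : ∀ i, i ∈ s ↔ i ∈ t) :
    pvM H s = pvM H t := by
  refine le_antisymm ?_ ?_
  · exact pvM_le H s _ (pvM_nonneg H t) fun i hi => le_pvM H t i ((h i).mp hi)
  · exact pvM_le H t _ (pvM_nonneg H s) fun i hi => le_pvM H s i ((h i).mpr hi)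

theorem pv_max_if (a b : Int) : (if b > a then b else a) = max a b := by
  rw [max_def]; split_ifs <;> omega

-- `[c] in w` is membership
theorem pv_isIn_singleton (c : Char) (w : List Char) :
    PySem.Chars.isIn [c] w = true ↔ c ∈ w := by
  rw [PySem.Chars.isIn_iff_infix]
  constructor
  · intro h
    exact h.mem (List.mem_singleton_self c)
  · intro h
    rcases List.append_of_mem h with ⟨pre, suf, rfl⟩
    exact ⟨pre, suf, by simp⟩

-- characterisation of pvIdx on the concrete alphabet
theorem pvIdx_alphabet (i : Nat) (h : i < 52) :
    pvIdx (pyAsciiLetters.getD i ' ') = some i := by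
  revert i; decide

theorem pv_toNat_inj (a b : Char) (h : a.toNat = b.toNat) : a = b := by
  apply Char.ext; exact UInt32.toNat_inj.mp h

theorem pv_alphabet_lower (n : Nat) (h1 : n < 123) (h2 : 97 ≤ n) :
    (pyAsciiLetters.getD (n - 97) ' ').toNat = n := by
  revert h2; revert n; decide

theorem pv_alphabet_upper (n : Nat) (h1 : n < 91) (h2 : 65 ≤ n) :
    (pyAsciiLetters.getD (26 + (n - 65)) ' ').toNat = n := by
  revert h2; revert n; decide

theorem pv_le_toNat (a b : Char) : a ≤ b ↔ a.toNat ≤ b.toNat := by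
  rw [Char.le_def]; exact UInt32.le_iff_toNat_le

theorem pvIdx_inv (c : Char) (i : Nat) (h : pvIdx c = some i) :
    i < 52 ∧ pyAsciiLetters.getD i ' ' = c := by
  unfold pvIdx at h
  split_ifs at h with h1 h2
  · obtain ⟨hl, hu⟩ := h1
    rw [pv_le_toNat] at hl hu
    have hl' : (97:Nat) ≤ c.toNat := hl
    have hu' : c.toNat ≤ 122 := hu
    obtain rfl : c.toNat - 97 = i := by injection h
    refine ⟨by omega, ?_⟩
    exact pv_toNat_inj _ _ (pv_alphabet_lower c.toNat (by omega) (by omega))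
  · obtain ⟨hl, hu⟩ := h2
    rw [pv_le_toNat] at hl hu
    have hl' : (65:Nat) ≤ c.toNat := hl
    have hu' : c.toNat ≤ 90 := hu
    obtain rfl : 26 + (c.toNat - 65) = i := by injection h
    refine ⟨by omega, ?_⟩
    exact pv_toNat_inj _ _ (pv_alphabet_upper c.toNat (by omega) (by omega))

-- A's loop computes pvM over the present letter indices
theorem pvA_eq (w : String) (H : List Int) :
    highlighted_area w H =
      (w.toList.length : Int) *
        pvM H ((List.range 52).filter (fun i => decide (pyAsciiLetters.getD i ' ' ∈ w.toList))) := by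
  unfold highlighted_area
  dsimp only
  congr 1
  have hrange : PySem.List.pyRange 0 ((pyAsciiLetters.length : Nat) : Int) 1
      = (List.range 52).map (fun (n : Nat) => (n : Int)) := by decide
  rw [hrange, List.foldl_map]
  have hcongr :
      (List.range 52).foldl
        (fun x (y : Nat) =>
          if PySem.Chars.isIn [PySem.List.pyGetD pyAsciiLetters ((y : Nat) : Int) ' '] w.toList then
            if PySem.List.pyGetD H ((y : Nat) : Int) 0 > x then PySem.List.pyGetD H ((y : Nat) : Int) 0 else x
          else x) 0
      = (List.range 52).foldl
          (fun (h : Int) (i : Nat) =>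
            if decide (pyAsciiLetters.getD i ' ' ∈ w.toList) = true then max h (pvG H i) else h) 0 := by
    apply PySem.List.foldl_congr_mem
    intro acc i _
    simp only [PySem.List.pyGetD_natCast]
    rw [pv_max_if]
    by_cases hmem : pyAsciiLetters.getD i ' ' ∈ w.toList
    · rw [if_pos ((pv_isIn_singleton _ _).mpr hmem), if_pos (decide_eq_true hmem)]
      rfl
    · rw [if_neg (fun hc => hmem ((pv_isIn_singleton _ _).mp hc)),
          if_neg (by simpa using hmem)]
  rw [hcongr, PySem.List.foldl_if_eq_foldl_filter]
  rfl

-- B's loop computes pvM over the letter indices of word's characters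
theorem pvB_fold (H : List Int) (l : List Char) (init : Int) :
    l.foldl
      (fun best c =>
        if 'a' ≤ c ∧ c ≤ 'z' then
          let h := PySem.List.pyGetD H ((c.toNat : Int) - 97) 0
          if h > best then h else best
        else if 'A' ≤ c ∧ c ≤ 'Z' then
          let h := PySem.List.pyGetD H (26 + (c.toNat : Int) - 65) 0
          if h > best then h else best
        else best) init
    = (l.filterMap pvIdx).foldl (fun h i => max h (pvG H i)) init := by
  induction l generalizing init with
  | nil => rfl
  | cons c l ih =>
    simp only [List.foldl_cons, List.filterMap_cons]
    by_cases h1 : 'a' ≤ c ∧ c ≤ 'z'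
    · have hl' : (97:Nat) ≤ c.toNat := (pv_le_toNat _ _).mp h1.1
      have hcast : ((c.toNat : Int) - 97) = ((c.toNat - 97 : Nat) : Int) := by omega
      rw [show pvIdx c = some (c.toNat - 97) from by rw [pvIdx, if_pos h1]]
      rw [if_pos h1, List.foldl_cons, ih]
      congr 1
      show (if PySem.List.pyGetD H ((c.toNat : Int) - 97) 0 > init
            then PySem.List.pyGetD H ((c.toNat : Int) - 97) 0 else init) = _
      rw [pv_max_if, hcast, PySem.List.pyGetD_natCast]
      rfl
    · by_cases h2 : 'A' ≤ c ∧ c ≤ 'Z'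
      · have hl' : (65:Nat) ≤ c.toNat := (pv_le_toNat _ _).mp h2.1
        have hcast : (26 + (c.toNat : Int) - 65) = ((26 + (c.toNat - 65) : Nat) : Int) := by omega
        rw [show pvIdx c = some (26 + (c.toNat - 65)) from by rw [pvIdx, if_neg h1, if_pos h2]]
        rw [if_neg h1, if_pos h2, List.foldl_cons, ih]
        congr 1
        show (if PySem.List.pyGetD H (26 + (c.toNat : Int) - 65) 0 > init
              then PySem.List.pyGetD H (26 + (c.toNat : Int) - 65) 0 else init) = _
        rw [pv_max_if, hcast, PySem.List.pyGetD_natCast]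
        rfl
      · rw [show pvIdx c = none from by rw [pvIdx, if_neg h1, if_neg h2]]
        rw [if_neg h1, if_neg h2]
        exact ih init

theorem pvB_eq (w : String) (H : List Int) :
    highlighted_area_alt w H = (w.toList.length : Int) * pvM H (w.toList.filterMap pvIdx) := by
  unfold highlighted_area_alt
  dsimp only
  congr 1
  exact pvB_fold H w.toList 0

theorem pv_mem_iff (w : List Char) (i : Nat) :
    i ∈ (List.range 52).filter (fun i => decide (pyAsciiLetters.getD i ' ' ∈ w)) ↔
      i ∈ w.filterMap pvIdx := by
  simp only [List.mem_filter, List.mem_range, decide_eq_true_eq, List.mem_filterMap]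
  constructor
  · rintro ⟨hi, hmem⟩
    exact ⟨_, hmem, pvIdx_alphabet i hi⟩
  · rintro ⟨c, hc, hidx⟩
    obtain ⟨hlt, heq⟩ := pvIdx_inv c i hidx
    exact ⟨hlt, heq ▸ hc⟩

-- ===== VERDICT (by name: the statement is the Claim_ definition above) =====
theorem highlighted_area_spec : Claim_equal_highlighted_area := by
  intro word heights _ _
  unfold Spec_highlighted_area
  rw [pvA_eq, pvB_eq]
  congr 1
  exact pvM_congr heights _ _ (pv_mem_iff word.toList)
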